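-- pv_equiv track=rewrite | github.com/sashapolo/hackerrank | InviteFriends/solution.py | _remove_unsuitable_friends
-- ===== SOURCE A (Python) =====
-- def _remove_unsuitable_friends(friend_graph, total_friends):
--     def delete_vertices(vertices):
--         for vertex in vertices:
--             del friend_graph[vertex]
--         for edges in friend_graph.values():
--             edges -= vertices
--
--     # a friend is considered unsuitable if he knows less than 3 people or doesn't know less than 3 people
--     unsuitable_friends = {
--         friend for friend, edges in friend_graph.items()
--         if len(edges) < 3 or len(edges) > total_friends - 3
--     }
--     if unsuitable_friends:
--         delete_vertices(unsuitable_friends)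
--     return unsuitable_friends
-- ===== SOURCE B (Python) =====
-- def _remove_unsuitable_friends(friend_graph, total_friends):
--     # Single pass: pop each unsuitable friend out of the graph as it is found,
--     # then clean up edges by visiting only the removed vertices' own neighbor
--     # sets (instead of subtracting the removed set from every remaining set).
--     # Return value is the same set; the in-place mutation of friend_graph may
--     # leave a different graph than A's on non-symmetric inputs.
--     removed = {}
--     for friend, edges in list(friend_graph.items()):
--         if not (3 <= len(edges) <= total_friends - 3):
--             removed[friend] = friend_graph.pop(friend)
--     for vertex, edges in removed.items():
--         for neighbor in edges:
--             nbrs = friend_graph.get(neighbor)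
--             if nbrs is not None:
--                 nbrs.discard(vertex)
--     return set(removed)
-- ===== Notes on version B (the rewrite author's own statement) =====
-- stated objective: alternative
-- what changed: B makes one pass that pops each unsuitable friend out of the dict as it is found (building the removed set incrementally) and then deletes reverse edges by visiting only each removed vertex's own neighbor sets, instead of A's two-stage comprehension over all items followed by subtracting the whole removed set from every remaining adjacency set.
import Mathlib
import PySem

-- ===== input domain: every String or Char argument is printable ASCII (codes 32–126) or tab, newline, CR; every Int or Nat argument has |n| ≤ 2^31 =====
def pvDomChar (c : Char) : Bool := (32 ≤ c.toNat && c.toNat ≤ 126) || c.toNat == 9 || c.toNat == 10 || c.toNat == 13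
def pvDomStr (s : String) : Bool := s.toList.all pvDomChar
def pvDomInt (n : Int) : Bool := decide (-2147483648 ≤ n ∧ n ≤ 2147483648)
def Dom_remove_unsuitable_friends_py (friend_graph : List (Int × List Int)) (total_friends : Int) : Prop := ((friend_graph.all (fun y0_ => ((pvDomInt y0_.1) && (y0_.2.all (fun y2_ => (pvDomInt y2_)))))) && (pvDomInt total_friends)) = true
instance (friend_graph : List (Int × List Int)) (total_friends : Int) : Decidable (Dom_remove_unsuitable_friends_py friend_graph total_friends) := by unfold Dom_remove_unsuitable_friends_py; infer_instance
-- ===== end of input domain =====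

-- B pops each unsuitable friend in a single pass and cleans reverse edges by visiting only the
-- removed vertices' own neighbors (an alternative algorithm of similar measured cost); the
-- equivalence proved is about the RETURN value only — both Pythons mutate friend_graph in
-- place, and on non-symmetric graphs the resulting graphs may differ.


-- ===== PORT A =====
-- friend_graph is a Python dict[int, set[int]]: realize it as a PySem.Dict with PySem.Set values.
-- The set comprehension over .items() becomes a foldl adding keys whose edge set is too small/large.
-- delete_vertices only mutates the dict; it does not affect the returned set, so it has no port.
def remove_unsuitable_friends_py (friend_graph : List (Int × List Int)) (total_friends : Int) : List Int :=
  let g : PySem.Dict Int (List Int) :=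
    friend_graph.foldl (fun d kv => d.insert kv.1 (PySem.Set.ofList kv.2)) PySem.Dict.empty
  g.items.foldl
    (fun s kv =>
      if ((kv.2.length : Int) < 3 ∨ (kv.2.length : Int) > total_friends - 3)
      then PySem.Set.add s kv.1 else s)
    PySem.Set.empty

-- ===== PORT B =====
-- B iterates once over the dict's items, popping unsuitable friends into `removed` and
-- returning set(removed); the edge clean-up loop only mutates the dict and does not
-- affect the returned set, so it has no port. Dict iteration over the raw pair list is
-- transcribed directly: keys in first-occurrence order, each carrying its LAST value
-- (pvLastVal?), skipping keys already seen.
def pvLastVal? (k : Int) : List (Int × List Int) → Option (List Int)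
  | [] => none
  | kv :: rest =>
    match pvLastVal? k rest with
    | some v => some v
    | none => if kv.1 == k then some kv.2 else none

def pvCollectRemoved (fg : List (Int × List Int)) (t : Int) :
    List (Int × List Int) → List Int → List Int
  | [], _ => []
  | kv :: rest, seen =>
    if seen.contains kv.1 then pvCollectRemoved fg t rest seen
    else
      let deg : Int := ((PySem.Set.ofList ((pvLastVal? kv.1 fg).getD [])).length : Int)
      if 3 ≤ deg ∧ deg ≤ t - 3 then pvCollectRemoved fg t rest (kv.1 :: seen)
      else kv.1 :: pvCollectRemoved fg t rest (kv.1 :: seen)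

def remove_unsuitable_friends_py_alt (friend_graph : List (Int × List Int)) (total_friends : Int) : List Int :=
  pvCollectRemoved friend_graph total_friends friend_graph []

-- ===== PRECONDITION & SPEC =====
def Spec_remove_unsuitable_friends_py (friend_graph : List (Int × List Int)) (total_friends : Int) (out : List Int) : Prop := out = remove_unsuitable_friends_py_alt friend_graph total_friends
instance (friend_graph : List (Int × List Int)) (total_friends : Int) (out : List Int) : Decidable (Spec_remove_unsuitable_friends_py friend_graph total_friends out) := by unfold Spec_remove_unsuitable_friends_py; infer_instance

-- ===== CLAIM (what is proved, stated in full; the proofs are below) =====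
def Claim_equal_remove_unsuitable_friends_py : Prop := ∀ (friend_graph : List (Int × List Int)) (total_friends : Int), Dom_remove_unsuitable_friends_py friend_graph total_friends → Spec_remove_unsuitable_friends_py friend_graph total_friends (remove_unsuitable_friends_py friend_graph total_friends)

-- ===== LEMMAS AND PROOFS =====

-- A select-into-a-set fold over pairs with distinct keys appends the filtered keys.
theorem pv_foldl_select (p : Int × List Int → Bool) :
    ∀ (l : List (Int × List Int)) (s : List Int),
      (l.map Prod.fst).Nodup → (∀ kv ∈ l, kv.1 ∉ s) →
      l.foldl (fun s kv => if p kv = true then PySem.Set.add s kv.1 else s) s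
        = s ++ (l.filter p).map Prod.fst := by
  intro l
  induction l with
  | nil => intro s _ _; simp
  | cons kv t ih =>
    intro s hnd hs
    rw [List.map_cons] at hnd
    have hnd' : (t.map Prod.fst).Nodup := hnd.of_cons
    have hkv : kv.1 ∉ t.map Prod.fst := (List.nodup_cons.mp hnd).1
    cases hp : p kv with
    | true =>
      have hadd : PySem.Set.add s kv.1 = s ++ [kv.1] :=
        PySem.Set.add_of_not_mem (hs kv (by simp))
      have hs' : ∀ kv' ∈ t, kv'.1 ∉ s ++ [kv.1] := by
        intro kv' hmem
        simp only [List.mem_append, List.mem_singleton]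
        rintro (h | h)
        · exact hs kv' (List.mem_cons_of_mem _ hmem) h
        · exact hkv (h ▸ List.mem_map_of_mem hmem)
      rw [List.foldl_cons, hp, if_pos rfl, hadd, ih _ hnd' hs']
      simp [List.filter_cons_of_pos, hp]
    | false =>
      have hs' : ∀ kv' ∈ t, kv'.1 ∉ s := fun kv' h => hs kv' (List.mem_cons_of_mem _ h)
      rw [List.foldl_cons, hp, if_neg (by simp), ih _ hnd' hs']
      simp [List.filter_cons_of_neg, hp]

-- A lookup into the dict built by the insert loop is the LAST value stored at that key.
theorem pv_get?_foldl_insert :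
    ∀ (l : List (Int × List Int)) (d : PySem.Dict Int (List Int)) (k : Int),
      (l.foldl (fun d kv => d.insert kv.1 (PySem.Set.ofList kv.2)) d).get? k
        = match pvLastVal? k l with
          | some v => some (PySem.Set.ofList v)
          | none => d.get? k := by
  intro l
  induction l with
  | nil => intro d k; simp [pvLastVal?]
  | cons kv rest ih =>
    intro d k
    rw [List.foldl_cons, ih]
    cases h : pvLastVal? k rest with
    | some v => simp [pvLastVal?, h]
    | none =>
      simp only [pvLastVal?, h]
      by_cases hk : kv.1 = k
      · subst hk; simp [PySem.Dict.get?_insert_self]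
      · rw [PySem.Dict.get?_insert_of_ne d _ (Ne.symm hk)]
        simp [hk]

-- The collector returns, in first-occurrence order, the unseen keys that fail the kept test.
theorem pv_collect_eq (fg : List (Int × List Int)) (t : Int) :
    ∀ (l : List (Int × List Int)) (seen : List Int),
      pvCollectRemoved fg t l seen
        = ((PySem.Set.ofList (l.map Prod.fst)).filter (fun k => !(seen.contains k))).filter
            (fun k =>
              !(decide (3 ≤ ((PySem.Set.ofList ((pvLastVal? k fg).getD [])).length : Int)
                 ∧ ((PySem.Set.ofList ((pvLastVal? k fg).getD [])).length : Int) ≤ t - 3))) := by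
  intro l
  induction l with
  | nil => intro seen; simp [pvCollectRemoved]
  | cons kv rest ih =>
    intro seen
    rw [List.map_cons, PySem.Set.ofList_cons]
    have hdis : PySem.Set.discard (PySem.Set.ofList (rest.map Prod.fst)) kv.1
        = (PySem.Set.ofList (rest.map Prod.fst)).filter (fun k => !(k == kv.1)) := rfl
    by_cases hseen : List.contains seen kv.1 = true
    · -- kv.1 was already seen: both sides ignore it
      have hstep : pvCollectRemoved fg t (kv :: rest) seen = pvCollectRemoved fg t rest seen := by
        simp only [pvCollectRemoved]
        rw [if_pos hseen]
      have habsorb : (PySem.Set.discard (PySem.Set.ofList (rest.map Prod.fst)) kv.1).filter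
            (fun k => !(seen.contains k))
          = (PySem.Set.ofList (rest.map Prod.fst)).filter (fun k => !(seen.contains k)) := by
        rw [hdis, List.filter_filter]
        apply List.filter_congr
        intro k _
        by_cases hk : k = kv.1
        · subst hk; rw [hseen]; simp
        · have : (k == kv.1) = false := by simp [hk]
          rw [this]; simp
      rw [hstep, ih seen, List.filter_cons]
      rw [show (!(seen.contains kv.1)) = false from by rw [hseen]; rfl]
      rw [if_neg (by simp), habsorb]
    · have hseen' : List.contains seen kv.1 = false := Bool.eq_false_iff.mpr hseen
      have htail :
          ((PySem.Set.ofList (rest.map Prod.fst)).filter (fun k => !(k == kv.1))).filter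
              (fun k => !(seen.contains k))
            = (PySem.Set.ofList (rest.map Prod.fst)).filter
                (fun k => !((kv.1 :: seen).contains k)) := by
        rw [List.filter_filter]
        apply List.filter_congr
        intro k _
        rw [List.contains_cons]
        cases h1 : (k == kv.1) <;> cases h2 : List.contains seen k <;> simp
      have hrhs : ((kv.1 :: PySem.Set.discard (PySem.Set.ofList (rest.map Prod.fst)) kv.1).filter
            (fun k => !(seen.contains k)))
          = kv.1 :: (PySem.Set.ofList (rest.map Prod.fst)).filter
              (fun k => !((kv.1 :: seen).contains k)) := by
        rw [List.filter_cons]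
        rw [show (!(seen.contains kv.1)) = true from by rw [hseen']; rfl]
        rw [if_pos rfl, hdis, htail]
      rw [hrhs]
      by_cases hkeep : (3 ≤ ((PySem.Set.ofList ((pvLastVal? kv.1 fg).getD [])).length : Int)
          ∧ ((PySem.Set.ofList ((pvLastVal? kv.1 fg).getD [])).length : Int) ≤ t - 3)
      · have hstep : pvCollectRemoved fg t (kv :: rest) seen
            = pvCollectRemoved fg t rest (kv.1 :: seen) := by
          simp only [pvCollectRemoved]
          rw [if_neg (by rw [hseen']; simp), if_pos hkeep]
        rw [hstep, ih (kv.1 :: seen), List.filter_cons]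
        rw [show (!(decide (3 ≤ ((PySem.Set.ofList ((pvLastVal? kv.1 fg).getD [])).length : Int)
            ∧ ((PySem.Set.ofList ((pvLastVal? kv.1 fg).getD [])).length : Int) ≤ t - 3)))
            = false from by rw [decide_eq_true hkeep]; rfl]
        rw [if_neg (by simp)]
      · have hstep : pvCollectRemoved fg t (kv :: rest) seen
            = kv.1 :: pvCollectRemoved fg t rest (kv.1 :: seen) := by
          simp only [pvCollectRemoved]
          rw [if_neg (by rw [hseen']; simp), if_neg hkeep]
        rw [hstep, ih (kv.1 :: seen), List.filter_cons]
        rw [show (!(decide (3 ≤ ((PySem.Set.ofList ((pvLastVal? kv.1 fg).getD [])).length : Int)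
            ∧ ((PySem.Set.ofList ((pvLastVal? kv.1 fg).getD [])).length : Int) ≤ t - 3)))
            = true from by rw [decide_eq_false hkeep]; rfl]
        rw [if_pos rfl]

-- ===== VERDICT (by name: the statement is the Claim_ definition above) =====
theorem remove_unsuitable_friends_py_spec : Claim_equal_remove_unsuitable_friends_py := by
  intro fg t _hdom
  unfold Spec_remove_unsuitable_friends_py remove_unsuitable_friends_py remove_unsuitable_friends_py_alt
  set g : PySem.Dict Int (List Int) :=
    fg.foldl (fun d kv => d.insert kv.1 (PySem.Set.ofList kv.2)) PySem.Dict.empty with hg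
  have hnd0 : g.keys.Nodup := by
    rw [hg]
    exact PySem.Dict.nodup_keys_foldl_insert_key fg _ _ _ PySem.Dict.nodup_keys_empty
  have hnd : (g.items.map Prod.fst).Nodup := hnd0
  -- A's fold collects the keys of the items that fail the degree window, in order.
  have hA : (List.foldl
      (fun s kv =>
        if ((kv.2.length : Int) < 3 ∨ (kv.2.length : Int) > t - 3)
        then PySem.Set.add s kv.1 else s)
      PySem.Set.empty g.items)
      = ((g.items.filter
          (fun kv => decide ((kv.2.length : Int) < 3 ∨ (kv.2.length : Int) > t - 3))).map Prod.fst) := by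
    have hfun : (fun (s : List Int) (kv : Int × List Int) =>
          if ((kv.2.length : Int) < 3 ∨ (kv.2.length : Int) > t - 3)
          then PySem.Set.add s kv.1 else s)
        = (fun (s : List Int) (kv : Int × List Int) =>
          if (fun kv : Int × List Int =>
              decide ((kv.2.length : Int) < 3 ∨ (kv.2.length : Int) > t - 3)) kv = true
          then PySem.Set.add s kv.1 else s) := by
      funext s kv
      by_cases h : ((kv.2.length : Int) < 3 ∨ (kv.2.length : Int) > t - 3)
      · rw [if_pos h, if_pos (by simpa using decide_eq_true h)]
      · rw [if_neg h, if_neg (by simpa using h)]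
    rw [hfun, pv_foldl_select _ g.items PySem.Set.empty hnd (by simp [PySem.Set.empty])]
    simp [PySem.Set.empty]
  rw [hA]
  -- items of g are its keys paired with their getD values …
  rw [PySem.Dict.items_eq_map_keys g hnd0 []]
  rw [List.filter_map, List.map_map]
  -- … and each getD value is Set.ofList of the LAST raw value at that key.
  have hval : ∀ k : Int, g.getD k [] = PySem.Set.ofList ((pvLastVal? k fg).getD []) := by
    intro k
    rw [PySem.Dict.getD_eq_get?_getD, hg, pv_get?_foldl_insert fg PySem.Dict.empty k]
    cases h : pvLastVal? k fg with
    | some v => simp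
    | none => simp [PySem.Dict.get?_empty, PySem.Set.ofList]
  -- B's collector over the raw list is the same filter over the same key list.
  rw [pv_collect_eq fg t fg []]
  have hkeys : g.keys = PySem.Set.ofList (fg.map Prod.fst) := by
    rw [hg, PySem.Dict.keys_foldl_insert_key, PySem.Dict.keys_empty,
      PySem.Set.update_nil_left]
  have hnoseen : ((PySem.Set.ofList (fg.map Prod.fst)).filter
      (fun k => !(List.contains ([] : List Int) k)))
      = PySem.Set.ofList (fg.map Prod.fst) := by
    apply List.filter_eq_self.mpr
    intro k _
    simp
  rw [hnoseen, ← hkeys]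
  simp only [Function.comp_def, List.map_id']
  apply List.filter_congr
  intro k _
  rw [hval k]
  have hiff : (((PySem.Set.ofList ((pvLastVal? k fg).getD [])).length : Int) < 3
      ∨ ((PySem.Set.ofList ((pvLastVal? k fg).getD [])).length : Int) > t - 3)
      ↔ ¬(3 ≤ ((PySem.Set.ofList ((pvLastVal? k fg).getD [])).length : Int)
          ∧ ((PySem.Set.ofList ((pvLastVal? k fg).getD [])).length : Int) ≤ t - 3) := by omega
  rw [← decide_not]
  exact decide_eq_decide.mpr hiff
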